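-- pv_equiv track=rewrite | github.com/hy-struggle/ccks_ner | clinic/PreModel_MRC/evaluate.py | pointer2bio
-- ===== SOURCE A (Python) =====
-- def pointer2bio(start_labels, end_labels, en_cate):
--     """convert (begin, end, span) label to bio label. for single sample.
--     :return: bio_labels List[str]: 实体序列（单样本）
--     """
--     # init
--     bio_labels = len(start_labels) * ["O"]
--
--     # 取出start idx和end idx
--     start_labels = [idx for idx, tmp in enumerate(start_labels) if tmp != 0]
--     end_labels = [idx for idx, tmp in enumerate(end_labels) if tmp != 0]
--
--     # 打start标
--     for start_item in start_labels:
--         bio_labels[start_item] = "B-{}".format(en_cate)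
--
--     # 打I标
--     for tmp_start in start_labels:
--         # 取出在start position后的end position
--         tmp_end = [tmp for tmp in end_labels if tmp >= tmp_start]
--         if len(tmp_end) == 0:
--             continue
--         else:
--             # 取出距离最近的end
--             tmp_end = min(tmp_end)
--         # 如果匹配则标记为实体
--         if tmp_start != tmp_end:
--             for i in range(tmp_start + 1, tmp_end + 1):
--                 bio_labels[i] = "I-{}".format(en_cate)
--         # 单字实体
--         else:
--             bio_labels[tmp_end] = "B-{}".format(en_cate)
--
--     return bio_labels
-- ===== SOURCE B (Python) =====
-- def pointer2bio(start_labels, end_labels, en_cate):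
--     """convert (begin, end, span) label to bio label. for single sample.
--     One left-to-right pass: a position is inside an entity iff some start lies
--     strictly between the last nonzero end and it, and a nonzero end still lies ahead.
--     """
--     n = len(start_labels)
--     b_tag = "B-" + en_cate
--     i_tag = "I-" + en_cate
--     max_end = -1
--     for j, v in enumerate(end_labels):
--         if v != 0:
--             max_end = j
--     out = []
--     open_start = False  # a start seen after the last nonzero end, before i
--     for i in range(n):
--         covered = open_start and i <= max_end
--         is_start = start_labels[i] != 0
--         is_end = i < len(end_labels) and end_labels[i] != 0
--         if is_start and (not covered or is_end):
--             out.append(b_tag)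
--         elif covered:
--             out.append(i_tag)
--         else:
--             out.append("O")
--         if is_end:
--             open_start = False
--         elif is_start:
--             open_start = True
--     return out
-- ===== Notes on version B (the rewrite author's own statement) =====
-- stated objective: faster
-- what changed: A marks B-tags, then for each nonzero start scans all nonzero ends for the nearest one and writes an I-fill range; B makes a single left-to-right pass deciding each position's tag locally from an 'open start since the last nonzero end' flag and the last nonzero end index, with no per-start scans or range fills.
import Mathlib
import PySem

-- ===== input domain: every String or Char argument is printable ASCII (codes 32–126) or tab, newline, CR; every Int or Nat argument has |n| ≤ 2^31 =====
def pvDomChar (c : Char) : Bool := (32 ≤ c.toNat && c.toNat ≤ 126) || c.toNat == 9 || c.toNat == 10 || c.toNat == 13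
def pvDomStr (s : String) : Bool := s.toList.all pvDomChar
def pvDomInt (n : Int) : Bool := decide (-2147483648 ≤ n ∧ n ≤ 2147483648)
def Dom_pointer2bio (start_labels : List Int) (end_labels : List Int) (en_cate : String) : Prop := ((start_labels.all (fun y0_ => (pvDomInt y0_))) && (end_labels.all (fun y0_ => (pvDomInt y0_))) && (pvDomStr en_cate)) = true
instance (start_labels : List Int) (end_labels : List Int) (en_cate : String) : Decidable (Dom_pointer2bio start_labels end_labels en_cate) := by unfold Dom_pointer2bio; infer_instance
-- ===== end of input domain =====

-- B replaces A's per-start nearest-end scans and range fills by a single left-to-right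
-- pass that decides each position's tag locally (objective: faster, O(n+m) vs O(S·m+S·n)).

-- ===== PORT A =====
-- literal transliteration of Source A; list writes use PySem.List.pySetD, exact here because
-- every written index is in range on the inputs admitted by Pre_pointer2bio (A raises
-- IndexError outside it).
def pointer2bio (start_labels : List Int) (end_labels : List Int) (en_cate : String) : List String :=
  let bio0 := List.replicate start_labels.length "O"
  let starts := ((PySem.List.enumerate start_labels).filter (fun p => p.2 != 0)).map (fun p => p.1)
  let ends := ((PySem.List.enumerate end_labels).filter (fun p => p.2 != 0)).map (fun p => p.1)
  let bio1 := starts.foldl (fun b s => PySem.List.pySetD b s ("B-" ++ en_cate)) bio0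
  starts.foldl (fun b s =>
    let tmp := ends.filter (fun x => s ≤ x)
    match PySem.List.min? tmp (fun x => x) with
    | none => b
    | some e =>
      if s ≠ e then
        (PySem.List.pyRange (s+1) (e+1) 1).foldl (fun b i => PySem.List.pySetD b i ("I-" ++ en_cate)) b
      else PySem.List.pySetD b e ("B-" ++ en_cate)) bio1

-- ===== PORT B =====
-- literal transliteration of Source B: one pass, state (open_start, out).
def pointer2bio_alt (start_labels : List Int) (end_labels : List Int) (en_cate : String) : List String :=
  let bTag := "B-" ++ en_cate
  let iTag := "I-" ++ en_cate
  let maxEnd := (PySem.List.enumerate end_labels).foldl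
      (fun m p => if p.2 != 0 then p.1 else m) (-1 : Int)
  ((PySem.List.pyRange 0 (start_labels.length : Int) 1).foldl
    (fun (st : Bool × List String) i =>
      let covered := st.1 && decide (i ≤ maxEnd)
      let isStart := PySem.List.pyGetD start_labels i 0 != 0
      let isEnd := decide (i < (end_labels.length : Int)) && (PySem.List.pyGetD end_labels i 0 != 0)
      ((if isEnd then false else if isStart then true else st.1),
       st.2 ++ [if isStart && (!covered || isEnd) then bTag
                else if covered then iTag else "O"]))
    (false, [])).2

-- ===== PRECONDITION & SPEC =====
-- Pre_ excludes exactly the inputs on which A raises IndexError: a nonzero start whose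
-- nearest nonzero end (in end_labels) lies at an index ≥ len(start_labels), which makes
-- A's I-fill write out of range.
def Pre_pointer2bio (start_labels : List Int) (end_labels : List Int) (en_cate : String) : Prop :=
  ∀ i < start_labels.length, start_labels.getD i 0 ≠ 0 →
    (∃ j < end_labels.length, i ≤ j ∧ end_labels.getD j 0 ≠ 0) →
    (∃ j < min start_labels.length end_labels.length, i ≤ j ∧ end_labels.getD j 0 ≠ 0)
instance (start_labels : List Int) (end_labels : List Int) (en_cate : String) : Decidable (Pre_pointer2bio start_labels end_labels en_cate) := by unfold Pre_pointer2bio; infer_instance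
def pvWitness_pointer2bio : List Int × List Int × String := ([1, 0, 0], [0, 1, 0], "X")

def Spec_pointer2bio (start_labels : List Int) (end_labels : List Int) (en_cate : String) (out : List String) : Prop := out = pointer2bio_alt start_labels end_labels en_cate
instance (start_labels : List Int) (end_labels : List Int) (en_cate : String) (out : List String) : Decidable (Spec_pointer2bio start_labels end_labels en_cate out) := by unfold Spec_pointer2bio; infer_instance

-- ===== CLAIM (what is proved, stated in full; the proofs are below) =====
def Claim_equal_pointer2bio : Prop := ∀ (start_labels : List Int) (end_labels : List Int) (en_cate : String), Dom_pointer2bio start_labels end_labels en_cate → Pre_pointer2bio start_labels end_labels en_cate → Spec_pointer2bio start_labels end_labels en_cate (pointer2bio start_labels end_labels en_cate)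

-- ===== LEMMAS AND PROOFS =====

-- closed-form per-position label both ports are proved to compute
def pB (s : List Int) (i : Nat) : Bool := s.getD i 0 != 0
def qB (e : List Int) (j : Nat) : Bool := e.getD j 0 != 0
def openB (s e : List Int) (i : Nat) : Bool :=
  decide (∃ t < i, pB s t = true ∧ ∀ j < i, t ≤ j → qB e j = false)
def hasEndB (e : List Int) (i : Nat) : Bool :=
  decide (∃ j < e.length, i ≤ j ∧ qB e j = true)
def covB (s e : List Int) (i : Nat) : Bool := openB s e i && hasEndB e i
def specFun (s e : List Int) (c : String) (i : Nat) : String :=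
  if pB s i && (!covB s e i || qB e i) then "B-" ++ c
  else if covB s e i then "I-" ++ c else "O"

lemma maxEnd_fold_iff (e : List Int) : ∀ (k m i : Int),
    (i ≤ (PySem.List.enumerate e k).foldl (fun m p => if p.2 != 0 then p.1 else m) m) ↔
    ((∃ j < e.length, e.getD j 0 ≠ 0 ∧ i ≤ k + j) ∨ ((∀ j < e.length, e.getD j 0 = 0) ∧ i ≤ m)) := by
  induction e with
  | nil => intro k m i; simp [PySem.List.enumerate_nil]
  | cons x xs ih =>
    intro k m i
    rw [PySem.List.enumerate_cons, List.foldl_cons, ih (k + 1)]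
    by_cases hx : x = 0
    · simp only [hx, bne_self_eq_false, Bool.false_eq_true, if_false]
      constructor
      · rintro (⟨j, hj, hq, hi⟩ | ⟨hall, hi⟩)
        · exact Or.inl ⟨j + 1, by simpa using hj, by simpa using hq, by push_cast; omega⟩
        · refine Or.inr ⟨?_, hi⟩
          intro j hj
          cases j with
          | zero => simpa using hx
          | succ j' => simpa using hall j' (by simpa using hj)
      · rintro (⟨j, hj, hq, hi⟩ | ⟨hall, hi⟩)
        · cases j with
          | zero => exact absurd hx (by simpa using hq)
          | succ j' =>
            exact Or.inl ⟨j', by simpa using hj, by simpa using hq, by push_cast at hi ⊢; omega⟩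
        · refine Or.inr ⟨fun j hj => by simpa using hall (j + 1) (by simpa using hj), hi⟩
    · have hxb : (x != 0) = true := by simpa using hx
      simp only [hxb, if_true]
      constructor
      · rintro (⟨j, hj, hq, hi⟩ | ⟨hall, hi⟩)
        · exact Or.inl ⟨j + 1, by simpa using hj, by simpa using hq, by push_cast; omega⟩
        · exact Or.inl ⟨0, by simp, by simpa using hx, by push_cast; omega⟩
      · rintro (⟨j, hj, hq, hi⟩ | ⟨hall, hi⟩)
        · cases j with
          | zero =>
            by_cases hz : ∀ j < xs.length, xs.getD j 0 = 0
            · exact Or.inr ⟨hz, by push_cast at hi; omega⟩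
            · push_neg at hz
              obtain ⟨j0, hj0, hq0⟩ := hz
              exact Or.inl ⟨j0, hj0, hq0, by push_cast at hi ⊢; omega⟩
          | succ j' =>
            exact Or.inl ⟨j', by simpa using hj, by simpa using hq, by push_cast at hi ⊢; omega⟩
        · exact absurd (by simpa using hall 0 (by simp)) hx

lemma decide_le_maxEnd (e : List Int) (t : Nat) :
    decide ((t : Int) ≤ (PySem.List.enumerate e 0).foldl (fun m p => if p.2 != 0 then p.1 else m) (-1)) = hasEndB e t := by
  unfold hasEndB qB
  rw [decide_eq_decide, maxEnd_fold_iff e 0 (-1) (t : Int)]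
  constructor
  · rintro (⟨j, hj, hq, hi⟩ | ⟨-, hi⟩)
    · exact ⟨j, hj, by push_cast at hi; omega, by simpa using hq⟩
    · omega
  · rintro ⟨j, hj, htj, hq⟩
    exact Or.inl ⟨j, hj, by simpa using hq, by push_cast; omega⟩

lemma isEnd_eq (e : List Int) (m : Nat) :
    (decide ((m : Int) < (e.length : Int)) && (PySem.List.pyGetD e (m : Int) 0 != 0)) = qB e m := by
  rw [PySem.List.pyGetD_natCast]
  by_cases h : m < e.length
  · simp [qB, h]
  · have hd : e.getD m 0 = 0 := List.getD_eq_default _ _ (by omega)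
    simp [qB, hd, h]

lemma openB_succ (s e : List Int) (m : Nat) :
    openB s e (m + 1) = if qB e m then false else if pB s m then true else openB s e m := by
  by_cases hq : qB e m = true
  · rw [hq, if_pos rfl]
    unfold openB
    rw [decide_eq_false_iff_not]
    rintro ⟨t, ht, hpt, hall⟩
    exact absurd hq (by simpa using hall m (by omega) (by omega))
  · rw [Bool.not_eq_true] at hq
    rw [hq, if_neg Bool.false_ne_true]
    by_cases hp : pB s m = true
    · rw [hp, if_pos rfl]
      unfold openB
      rw [decide_eq_true_iff]
      exact ⟨m, by omega, hp, fun j hj hmj => by rw [show j = m by omega, hq]⟩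
    · rw [Bool.not_eq_true] at hp
      rw [hp, if_neg Bool.false_ne_true]
      unfold openB
      rw [decide_eq_decide]
      constructor
      · rintro ⟨t, ht, hpt, hall⟩
        have htm : t ≠ m := fun h => by rw [h, hp] at hpt; exact Bool.false_ne_true hpt
        exact ⟨t, by omega, hpt, fun j hj htj => hall j (by omega) htj⟩
      · rintro ⟨t, ht, hpt, hall⟩
        refine ⟨t, by omega, hpt, fun j hj htj => ?_⟩
        rcases Nat.lt_or_ge j m with h' | h'
        · exact hall j h' htj
        · rw [show j = m by omega, hq]

lemma openB_zero (s e : List Int) : openB s e 0 = false := by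
  unfold openB
  rw [decide_eq_false_iff_not]
  rintro ⟨t, ht, -⟩
  omega

lemma pB_eq (s : List Int) (m : Nat) : (PySem.List.pyGetD s (m : Int) 0 != 0) = pB s m := by
  rw [PySem.List.pyGetD_natCast]; rfl

lemma alt_fold (s e : List Int) (c : String)
    (step : Bool × List String → Int → Bool × List String)
    (hstep : ∀ (b : Bool) (out : List String) (m : Nat),
      step (b, out) (m : Int) =
        ((if qB e m then false else if pB s m then true else b),
         out ++ [if pB s m && (!(b && hasEndB e m) || qB e m) then "B-" ++ c
                 else if b && hasEndB e m then "I-" ++ c else "O"])) :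
    ∀ n : Nat, (List.map (fun (k : Nat) => (k : Int)) (List.range n)).foldl step (false, []) =
      (openB s e n, (List.range n).map (specFun s e c)) := by
  intro n
  induction n with
  | zero => simp [openB_zero]
  | succ n ih =>
    rw [List.range_succ, List.map_append, List.foldl_append, ih]
    simp only [List.map_cons, List.map_nil, List.foldl_cons, List.foldl_nil]
    rw [hstep (openB s e n) _ n, openB_succ, List.map_append]
    rfl

theorem alt_eq_map_spec (s e : List Int) (c : String) :
    pointer2bio_alt s e c = (List.range s.length).map (specFun s e c) := by
  have h := alt_fold s e c
      (fun (st : Bool × List String) i =>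
        ((if decide (i < (e.length : Int)) && (PySem.List.pyGetD e i 0 != 0) then false
          else if PySem.List.pyGetD s i 0 != 0 then true else st.1),
         st.2 ++ [if (PySem.List.pyGetD s i 0 != 0) &&
                     (!(st.1 && decide (i ≤ (PySem.List.enumerate e 0).foldl (fun m p => if p.2 != 0 then p.1 else m) (-1))) ||
                      (decide (i < (e.length : Int)) && (PySem.List.pyGetD e i 0 != 0))) then "B-" ++ c
                  else if st.1 && decide (i ≤ (PySem.List.enumerate e 0).foldl (fun m p => if p.2 != 0 then p.1 else m) (-1)) then "I-" ++ c
                  else "O"]))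
      (by intro b out m
          dsimp only
          rw [isEnd_eq, pB_eq, decide_le_maxEnd])
      s.length
  calc pointer2bio_alt s e c
      = (((PySem.List.pyRange 0 (s.length : Int) 1)).foldl
          (fun (st : Bool × List String) i =>
            ((if decide (i < (e.length : Int)) && (PySem.List.pyGetD e i 0 != 0) then false
              else if PySem.List.pyGetD s i 0 != 0 then true else st.1),
             st.2 ++ [if (PySem.List.pyGetD s i 0 != 0) &&
                         (!(st.1 && decide (i ≤ (PySem.List.enumerate e 0).foldl (fun m p => if p.2 != 0 then p.1 else m) (-1))) ||
                          (decide (i < (e.length : Int)) && (PySem.List.pyGetD e i 0 != 0))) then "B-" ++ c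
                      else if st.1 && decide (i ≤ (PySem.List.enumerate e 0).foldl (fun m p => if p.2 != 0 then p.1 else m) (-1)) then "I-" ++ c
                      else "O"]))
          (false, [])).2 := rfl
    _ = (List.range s.length).map (specFun s e c) := by
          rw [PySem.List.pyRange_zero_nat, h]

-- ---------- A side ----------

def nzIdx (l : List Int) : List Int :=
  ((PySem.List.enumerate l).filter (fun p => p.2 != 0)).map (fun p => p.1)

def eOf (e : List Int) (x : Int) : Option Int :=
  PySem.List.min? ((nzIdx e).filter (fun y => x ≤ y)) (fun y => y)

def step2 (e : List Int) (c : String) (b : List String) (x : Int) : List String :=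
  match eOf e x with
  | none => b
  | some ev =>
    if x ≠ ev then
      (PySem.List.pyRange (x + 1) (ev + 1) 1).foldl (fun b i => PySem.List.pySetD b i ("I-" ++ c)) b
    else PySem.List.pySetD b ev ("B-" ++ c)

lemma step2_none {e : List Int} {c : String} {b : List String} {x : Int}
    (h : eOf e x = none) : step2 e c b x = b := by
  unfold step2; rw [h]

lemma step2_some_ne {e : List Int} {c : String} {b : List String} {x ev : Int}
    (h : eOf e x = some ev) (hne : x ≠ ev) :
    step2 e c b x = (PySem.List.pyRange (x + 1) (ev + 1) 1).foldl (fun b i => PySem.List.pySetD b i ("I-" ++ c)) b := by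
  unfold step2; rw [h]; simp [hne]

lemma step2_some_eq {e : List Int} {c : String} {b : List String} {x ev : Int}
    (h : eOf e x = some ev) (heq : x = ev) :
    step2 e c b x = PySem.List.pySetD b ev ("B-" ++ c) := by
  unfold step2; rw [h]; simp [heq]

lemma pB_lt {l : List Int} {t : Nat} (h : pB l t = true) : t < l.length := by
  by_contra hc
  unfold pB at h
  rw [List.getD_eq_default _ _ (by omega)] at h
  simp at h

lemma mem_nzIdx (l : List Int) (x : Int) :
    x ∈ nzIdx l ↔ ∃ t : Nat, t < l.length ∧ pB l t = true ∧ x = (t : Int) := by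
  unfold nzIdx
  simp only [List.mem_map, List.mem_filter, PySem.List.mem_enumerate_iff]
  constructor
  · rintro ⟨p, ⟨⟨k, hk, rfl⟩, hne⟩, rfl⟩
    refine ⟨k, hk, ?_, by simp⟩
    unfold pB
    rw [List.getD_eq_getElem l 0 hk]
    simpa using hne
  · rintro ⟨t, ht, hp, rfl⟩
    refine ⟨((t : Int), l[t]), ⟨⟨t, ht, by simp⟩, ?_⟩, rfl⟩
    unfold pB at hp
    rw [List.getD_eq_getElem l 0 ht] at hp
    simpa using hp

lemma pairwise_nzIdx (l : List Int) : (nzIdx l).Pairwise (· < ·) := by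
  unfold nzIdx
  exact List.Pairwise.map _ (fun a b h => h) ((PySem.List.pairwise_lt_enumerate l 0).filter _)

lemma eOf_spec {e : List Int} {x ev : Int} (h : eOf e x = some ev) :
    ev ∈ nzIdx e ∧ x ≤ ev ∧ ∀ y ∈ nzIdx e, x ≤ y → ev ≤ y := by
  have hm := PySem.List.min?_mem h
  rw [List.mem_filter] at hm
  refine ⟨hm.1, by simpa using hm.2, ?_⟩
  intro y hy hxy
  have := PySem.List.min?_isMin h y (List.mem_filter.mpr ⟨hy, by simpa using hxy⟩)
  simpa using this

lemma eOf_isSome {e : List Int} {x : Int} {j : Nat}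
    (hj : j < e.length) (hq : qB e j = true) (hxj : x ≤ (j : Int)) :
    ∃ ev, eOf e x = some ev := by
  cases hev : eOf e x with
  | some ev => exact ⟨ev, rfl⟩
  | none =>
    exfalso
    rw [eOf, PySem.List.min?_eq_none_iff, List.filter_eq_nil_iff] at hev
    exact absurd (by simpa using hxj)
      (by simpa using hev ((j : Nat) : Int) ((mem_nzIdx e _).mpr ⟨j, hj, hq, rfl⟩))

lemma eOf_self_iff (e : List Int) (t : Nat) :
    eOf e (t : Int) = some (t : Int) ↔ qB e t = true := by
  constructor
  · intro h
    obtain ⟨hm, -, -⟩ := eOf_spec h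
    obtain ⟨u, hu, hq, he⟩ := (mem_nzIdx e _).mp hm
    have hut : u = t := by omega
    rwa [hut] at hq
  · intro hq
    have ht : t < e.length := pB_lt hq
    obtain ⟨ev, hev⟩ := eOf_isSome ht hq le_rfl
    obtain ⟨hm, hle, hmin⟩ := eOf_spec hev
    have h2 : ev ≤ (t : Int) := hmin _ ((mem_nzIdx e _).mpr ⟨t, ht, hq, rfl⟩) le_rfl
    rw [hev, le_antisymm h2 hle]

def hitB (e : List Int) (i : Nat) (x : Int) : Bool :=
  (x == (i : Int)) && (eOf e x == some x)

def hitI (e : List Int) (i : Nat) (x : Int) : Bool :=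
  decide (x < (i : Int)) &&
    (match eOf e x with
     | none => false
     | some ev => decide ((i : Int) ≤ ev))

lemma length_fold_pySetD (v : String) : ∀ (l : List Int) (b : List String),
    (l.foldl (fun b i => PySem.List.pySetD b i v) b).length = b.length := by
  intro l
  induction l with
  | nil => intro b; rfl
  | cons x xs ih =>
    intro b
    rw [List.foldl_cons, ih]
    exact PySem.List.length_pySetD b x v

lemma length_fold_step2 (e : List Int) (c : String) : ∀ (l : List Int) (b : List String),
    (l.foldl (step2 e c) b).length = b.length := by
  intro l
  induction l with
  | nil => intro b; rfl
  | cons x xs ih =>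
    intro b
    rw [List.foldl_cons, ih]
    cases hev : eOf e x with
    | none => rw [step2_none hev]
    | some ev =>
      by_cases hne : x = ev
      · rw [step2_some_eq hev hne]; exact PySem.List.length_pySetD b ev _
      · rw [step2_some_ne hev hne]; exact length_fold_pySetD _ _ b

lemma fold_set_get (v : String) : ∀ (l : List Int) (b : List String), (∀ x ∈ l, 0 ≤ x) →
    ∀ i : Nat, (l.foldl (fun b y => PySem.List.pySetD b y v) b)[i]? =
      if (i : Int) ∈ l ∧ i < b.length then some v else b[i]? := by
  intro l
  induction l with
  | nil => intro b _ i; simp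
  | cons x xs ih =>
    intro b hnn i
    have hx : 0 ≤ x := hnn x List.mem_cons_self
    rw [List.foldl_cons, ih (PySem.List.pySetD b x v) (fun y hy => hnn y (List.mem_cons_of_mem x hy)) i,
        PySem.List.length_pySetD, PySem.List.pySetD_of_nonneg b v hx, List.getElem?_set]
    by_cases h2 : i < b.length
    · by_cases h1 : (i : Int) ∈ xs
      · simp [h1, h2, List.mem_cons]
      · by_cases h3 : x = (i : Int)
        · have h4 : x.toNat = i := by omega
          simp [h1, h2, h3, h4, List.mem_cons]
        · have h4 : ¬ (x.toNat = i) := by omega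
          simp [h1, h2, h3, h4, List.mem_cons, show ¬((i : Int) = x) from fun h => h3 h.symm]
    · by_cases h4 : x.toNat = i
      · simp [h2, h4]
      · simp [h2, h4]

lemma fold_step2_get (s e : List Int) (c : String) :
    ∀ (l : List Int), l.Pairwise (· < ·) →
      (∀ x ∈ l, ∃ t : Nat, t < s.length ∧ pB s t = true ∧ x = (t : Int)) →
      ∀ (b : List String), b.length = s.length →
      ∀ i : Nat, i < s.length →
        (l.foldl (step2 e c) b)[i]? =
          if l.any (hitB e i) then some ("B-" ++ c)
          else if l.any (hitI e i) then some ("I-" ++ c)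
          else b[i]? := by
  intro l
  induction l using List.reverseRecOn with
  | nil => intro _ _ b _ i _; simp
  | append_singleton l' a ih =>
    intro hpw hmem b hb i hi
    have hpw' : l'.Pairwise (· < ·) := (List.pairwise_append.mp hpw).1
    have hmem' : ∀ x ∈ l', ∃ t : Nat, t < s.length ∧ pB s t = true ∧ x = (t : Int) :=
      fun x hx => hmem x (List.mem_append_left _ hx)
    have hlt : ∀ u ∈ l', u < a :=
      fun u hu => (List.pairwise_append.mp hpw).2.2 u hu a (by simp)
    obtain ⟨ta, hta, hpa, hae⟩ := hmem a (by simp)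
    have ha0 : 0 ≤ a := by omega
    have hfl : (l'.foldl (step2 e c) b).length = s.length := by
      rw [length_fold_step2, hb]
    rw [List.foldl_append, List.foldl_cons, List.foldl_nil, List.any_append]
    cases hev : eOf e a with
    | none =>
      have hBa : hitB e i a = false := by unfold hitB; rw [hev]; simp
      have hIa : hitI e i a = false := by unfold hitI; rw [hev]; simp
      rw [step2_none hev, ih hpw' hmem' b hb i hi]
      simp [hBa, hIa]
    | some ev =>
      obtain ⟨hmv, hlev, hminv⟩ := eOf_spec hev
      by_cases hxe : a = ev
      · -- single-character entity: B written at ev = a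
        rw [step2_some_eq hev hxe, PySem.List.pySetD_of_nonneg _ _ (hxe ▸ ha0), List.getElem?_set]
        by_cases hai : a = (i : Int)
        · have h1 : ev.toNat = i := by omega
          have hBa : hitB e i a = true := by
            unfold hitB
            rw [hev, ← hxe, hai]
            simp
          rw [if_pos h1, if_pos (by rw [hfl]; omega)]
          simp [hBa]
        · have h1 : ¬ (ev.toNat = i) := by omega
          have hBa : hitB e i a = false := by
            unfold hitB
            simp [hai]
          have hIa : hitI e i a = false := by
            unfold hitI
            rw [hev]
            by_cases hlt2 : a < (i : Int)
            · simp only [hlt2, decide_true, Bool.true_and]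
              simpa using (by omega : ¬ ((i : Int) ≤ ev))
            · simp [hlt2]
          rw [if_neg h1, ih hpw' hmem' b hb i hi]
          simp [hBa, hIa]
      · -- real span: I-fill from a+1 to ev
        have hav : a < ev := lt_of_le_of_ne hlev hxe
        rw [step2_some_ne hev hxe,
            fold_set_get _ _ _ (fun x hx => by rw [PySem.List.mem_pyRange_one] at hx; omega) i]
        simp only [PySem.List.mem_pyRange_one]
        by_cases hcov : a < (i : Int) ∧ (i : Int) ≤ ev
        · have hBl' : l'.any (hitB e i) = false := by
            rw [List.any_eq_false]
            intro x hx
            have hxa := hlt x hx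
            unfold hitB
            simp [show x ≠ (i : Int) by omega]
          have hBa : hitB e i a = false := by
            unfold hitB
            simp [show a ≠ (i : Int) by omega]
          have hIa : hitI e i a = true := by
            unfold hitI
            rw [hev]
            simp [hcov.1, hcov.2]
          rw [if_pos ⟨⟨by omega, by omega⟩, by rw [hfl]; exact hi⟩]
          simp [hBa, hBl', hIa]
        · have hBa : hitB e i a = false := by
            unfold hitB
            rw [hev]
            simp [show ev ≠ a from fun h => hxe h.symm]
          have hIa : hitI e i a = false := by
            unfold hitI
            rw [hev]
            by_cases hlt2 : a < (i : Int)
            · simp only [hlt2, decide_true, Bool.true_and]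
              simpa using (by omega : ¬ ((i : Int) ≤ ev))
            · simp [hlt2]
          rw [if_neg (by rintro ⟨⟨hh1, hh2⟩, -⟩; exact hcov ⟨by omega, by omega⟩),
              ih hpw' hmem' b hb i hi]
          simp [hBa, hIa]

lemma bridgeB (s e : List Int) (i : Nat) (hi : i < s.length) :
    (nzIdx s).any (hitB e i) = (pB s i && qB e i) := by
  rw [Bool.eq_iff_iff, List.any_eq_true, Bool.and_eq_true]
  constructor
  · rintro ⟨x, hx, hhit⟩
    unfold hitB at hhit
    rw [Bool.and_eq_true, beq_iff_eq, beq_iff_eq] at hhit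
    obtain ⟨hx1, hx2⟩ := hhit
    obtain ⟨t, ht, hp, hxe⟩ := (mem_nzIdx s x).mp hx
    have hti : t = i := by omega
    rw [hti] at hp
    rw [hx1] at hx2
    exact ⟨hp, (eOf_self_iff e i).mp hx2⟩
  · rintro ⟨hp, hq⟩
    refine ⟨(i : Int), (mem_nzIdx s _).mpr ⟨i, hi, hp, rfl⟩, ?_⟩
    unfold hitB
    rw [Bool.and_eq_true, beq_iff_eq, beq_iff_eq]
    exact ⟨rfl, (eOf_self_iff e i).mpr hq⟩

lemma bridgeI (s e : List Int) (i : Nat) :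
    (nzIdx s).any (hitI e i) = covB s e i := by
  rw [Bool.eq_iff_iff, List.any_eq_true]
  unfold covB
  rw [Bool.and_eq_true]
  constructor
  · rintro ⟨x, hx, hhit⟩
    unfold hitI at hhit
    rw [Bool.and_eq_true] at hhit
    obtain ⟨hxi', hrest⟩ := hhit
    have hxi : x < (i : Int) := by simpa using hxi'
    cases hev : eOf e x with
    | none => rw [hev] at hrest; simp at hrest
    | some ev =>
      rw [hev] at hrest
      have hiev : (i : Int) ≤ ev := by simpa using hrest
      obtain ⟨t, ht, hp, hxt⟩ := (mem_nzIdx s x).mp hx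
      obtain ⟨hmv, hxv, hminv⟩ := eOf_spec hev
      obtain ⟨u, hu, hqu, hevu⟩ := (mem_nzIdx e ev).mp hmv
      constructor
      · unfold openB
        rw [decide_eq_true_iff]
        refine ⟨t, by omega, hp, ?_⟩
        intro j hj htj
        by_contra hqj
        rw [Bool.not_eq_false] at hqj
        have hjl : j < e.length := pB_lt hqj
        have hevj : ev ≤ (j : Int) :=
          hminv _ ((mem_nzIdx e _).mpr ⟨j, hjl, hqj, rfl⟩) (by omega)
        omega
      · unfold hasEndB
        rw [decide_eq_true_iff]
        exact ⟨u, hu, by omega, hqu⟩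
  · rintro ⟨ho, hh⟩
    unfold openB at ho
    rw [decide_eq_true_iff] at ho
    obtain ⟨t, ht, hp, hall⟩ := ho
    unfold hasEndB at hh
    rw [decide_eq_true_iff] at hh
    obtain ⟨j, hj, hij, hqj⟩ := hh
    obtain ⟨ev, hev⟩ := eOf_isSome (x := (t : Int)) hj hqj (by omega)
    obtain ⟨hmv, hxv, hminv⟩ := eOf_spec hev
    obtain ⟨u, hu, hqu, hevu⟩ := (mem_nzIdx e ev).mp hmv
    have hiev : (i : Nat) ≤ u := by
      by_contra hc
      have hq2 : qB e u = true := hqu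
      rw [hall u (by omega) (by omega)] at hq2
      exact absurd hq2 (by simp)
    refine ⟨(t : Int), (mem_nzIdx s _).mpr ⟨t, pB_lt hp, hp, rfl⟩, ?_⟩
    unfold hitI
    rw [hev, Bool.and_eq_true]
    exact ⟨by simpa using ht, by simp; omega⟩

lemma specFun_cases (s e : List Int) (c : String) (i : Nat) :
    specFun s e c i = if pB s i && qB e i then "B-" ++ c
      else if covB s e i then "I-" ++ c
      else if pB s i then "B-" ++ c else "O" := by
  cases hp : pB s i <;> cases hq : qB e i <;> cases hc : covB s e i <;>
    simp [specFun, hp, hq, hc]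

theorem a_eq_map_spec (s e : List Int) (c : String) :
    pointer2bio s e c = (List.range s.length).map (specFun s e c) := by
  have hA : pointer2bio s e c = (nzIdx s).foldl (step2 e c)
      ((nzIdx s).foldl (fun b y => PySem.List.pySetD b y ("B-" ++ c)) (List.replicate s.length "O")) := rfl
  rw [hA]
  apply List.ext_getElem?
  intro i
  by_cases hi : i < s.length
  · rw [fold_step2_get s e c _ (pairwise_nzIdx s) (fun x hx => (mem_nzIdx s x).mp hx) _
          (by rw [length_fold_pySetD, List.length_replicate]) i hi,
        fold_set_get ("B-" ++ c) (nzIdx s) _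
          (fun x hx => by obtain ⟨t, -, -, rfl⟩ := (mem_nzIdx s x).mp hx; exact Int.natCast_nonneg t) i,
        bridgeB s e i hi, bridgeI s e i, List.getElem?_map, List.getElem?_range hi,
        List.length_replicate, List.getElem?_replicate, if_pos hi]
    simp only [Option.map_some]
    rw [specFun_cases]
    have hmem : ((i : Int) ∈ nzIdx s ∧ i < s.length) ↔ pB s i = true := by
      constructor
      · rintro ⟨hm, -⟩
        obtain ⟨t, ht, hp, hte⟩ := (mem_nzIdx s _).mp hm
        have : t = i := by omega
        rwa [this] at hp
      · intro hp
        exact ⟨(mem_nzIdx s _).mpr ⟨i, hi, hp, rfl⟩, hi⟩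
    rw [if_congr hmem rfl rfl]
    split_ifs <;> simp_all
  · rw [List.getElem?_eq_none
          (by rw [length_fold_step2, length_fold_pySetD, List.length_replicate]; omega),
        List.getElem?_eq_none (by rw [List.length_map, List.length_range]; omega)]

-- ===== VERDICT (by name: the statement is the Claim_ definition above) =====
theorem pointer2bio_spec : Claim_equal_pointer2bio := by
  intro s e c _ _
  unfold Spec_pointer2bio
  rw [alt_eq_map_spec, a_eq_map_spec]
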